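-- pv_equiv track=rewrite | github.com/FlamurMaliqi/flashTool | src/a2lFastLogPostProcessing.py | get_fastlogging_block
-- ===== SOURCE A (Python) =====
-- NAME_FASTLOGGING =                  '    /* Name                   */      '
--
-- def get_fastlogging_block(a2l_file_content_lines, fastlogging_name): #returns a block - /begin MEASUREMENT to /end MEASUREMENT, e.g. line 15
--     in_block = False
--     block_lines = []
--     target_line = NAME_FASTLOGGING + fastlogging_name
--
--     for line in a2l_file_content_lines:
--         if target_line  == line:
--             in_block = True
--
--         if in_block:
--             block_lines.append(line)
--             if "/end MEASUREMENT" in line: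
--                 in_block= False
--                 break
--     return block_lines
-- ===== SOURCE B (Python) =====
-- NAME_FASTLOGGING =                  '    /* Name                   */      '
--
-- def get_fastlogging_block(a2l_file_content_lines, fastlogging_name):
--     # Two-phase: locate the start line, then gather until the end marker (inclusive).
--     target_line = NAME_FASTLOGGING + fastlogging_name
--     try:
--         start = a2l_file_content_lines.index(target_line)
--     except ValueError:
--         return []
--     block_lines = []
--     for line in a2l_file_content_lines[start:]:
--         block_lines.append(line)
--         if "/end MEASUREMENT" in line:
--             break
--     return block_lines
-- ===== Notes on version B (the rewrite author's own statement) =====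
-- stated objective: idiomatic
-- what changed: Replaced the single-pass boolean in_block flag loop with a two-phase decomposition: find the index of the start line with list.index (returning [] when absent), then collect lines from that index until the '/end MEASUREMENT' marker inclusive.
import Mathlib
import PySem

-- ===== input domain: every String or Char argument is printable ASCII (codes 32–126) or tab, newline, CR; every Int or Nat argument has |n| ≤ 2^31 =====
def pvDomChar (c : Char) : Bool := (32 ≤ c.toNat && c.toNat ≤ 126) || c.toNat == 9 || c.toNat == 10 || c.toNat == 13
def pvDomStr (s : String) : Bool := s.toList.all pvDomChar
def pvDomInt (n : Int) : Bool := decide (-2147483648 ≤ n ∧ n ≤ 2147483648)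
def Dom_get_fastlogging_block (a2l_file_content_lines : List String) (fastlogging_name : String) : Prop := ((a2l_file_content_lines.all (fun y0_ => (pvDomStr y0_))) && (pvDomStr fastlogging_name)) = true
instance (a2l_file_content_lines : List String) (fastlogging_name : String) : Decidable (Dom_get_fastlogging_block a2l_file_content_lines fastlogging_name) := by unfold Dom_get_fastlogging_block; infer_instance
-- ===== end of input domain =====

-- B replaces A's boolean in_block flag pass with a two-phase find-then-collect decomposition (same
-- return value; objective: idiomatic, no speed claim).

def NAME_FASTLOGGING : String := "    /* Name                   */      "

-- ===== PORT A =====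
-- A's single loop: in_block flag set on the target line; append while in_block; break (stop) on the
-- '/end MEASUREMENT' line after appending it.
def pvLoopA (target : String) (in_block : Bool) : List String → List String
  | [] => []
  | line :: rest =>
    let inb := if target == line then true else in_block
    if inb then
      if PySem.Str.isIn "/end MEASUREMENT" line then [line]
      else line :: pvLoopA target inb rest
    else pvLoopA target inb rest

def get_fastlogging_block (a2l_file_content_lines : List String) (fastlogging_name : String) : List String :=
  pvLoopA (NAME_FASTLOGGING ++ fastlogging_name) false a2l_file_content_lines

-- ===== PORT B =====
-- phase 2 of B: append each line, break after the '/end MEASUREMENT' line.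
def pvCollectB : List String → List String
  | [] => []
  | line :: rest =>
    line :: (if PySem.Str.isIn "/end MEASUREMENT" line then [] else pvCollectB rest)

def get_fastlogging_block_alt (a2l_file_content_lines : List String) (fastlogging_name : String) : List String :=
  match PySem.List.index? a2l_file_content_lines (NAME_FASTLOGGING ++ fastlogging_name) with
  | none => []
  | some start => pvCollectB (PySem.List.slice a2l_file_content_lines (some (start : Int)) none)

-- ===== PRECONDITION & SPEC =====
def Spec_get_fastlogging_block (a2l_file_content_lines : List String) (fastlogging_name : String) (out : List String) : Prop := out = get_fastlogging_block_alt a2l_file_content_lines fastlogging_name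
instance (a2l_file_content_lines : List String) (fastlogging_name : String) (out : List String) : Decidable (Spec_get_fastlogging_block a2l_file_content_lines fastlogging_name out) := by unfold Spec_get_fastlogging_block; infer_instance

-- ===== CLAIM (what is proved, stated in full; the proofs are below) =====
def Claim_equal_get_fastlogging_block : Prop := ∀ (a2l_file_content_lines : List String) (fastlogging_name : String), Dom_get_fastlogging_block a2l_file_content_lines fastlogging_name → Spec_get_fastlogging_block a2l_file_content_lines fastlogging_name (get_fastlogging_block a2l_file_content_lines fastlogging_name)

-- ===== LEMMAS AND PROOFS =====

theorem pvLoopA_true (target : String) (ls : List String) :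
    pvLoopA target true ls = pvCollectB ls := by
  induction ls with
  | nil => rfl
  | cons l rest ih =>
    rw [pvLoopA, pvCollectB]
    simp only [ite_self, if_pos]
    split <;> simp [ih]

theorem pvLoopA_false (target : String) (ls : List String) :
    pvLoopA target false ls =
      match PySem.List.index? ls target with
      | none => []
      | some start => pvCollectB (ls.drop start) := by
  induction ls with
  | nil => rfl
  | cons l rest ih =>
    by_cases h : l = target
    · subst h
      rw [PySem.List.index?_cons_self]
      show pvLoopA l false (l :: rest) = pvCollectB (List.drop 0 (l :: rest))
      rw [List.drop_zero, pvLoopA, pvCollectB]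
      simp only [beq_self_eq_true, ite_true]
      split <;> simp [pvLoopA_true]
    · rw [PySem.List.index?_cons_of_ne rest h, pvLoopA]
      have ht : (target == l) = false := beq_eq_false_iff_ne.mpr (Ne.symm h)
      rw [ht]
      simp only [Bool.false_eq_true, if_false]
      rw [ih]
      cases PySem.List.index? rest target <;> simp

-- ===== VERDICT (by name: the statement is the Claim_ definition above) =====
theorem get_fastlogging_block_spec : Claim_equal_get_fastlogging_block := by
  intro lines name _
  unfold Spec_get_fastlogging_block get_fastlogging_block get_fastlogging_block_alt
  rw [pvLoopA_false]
  cases h : PySem.List.index? lines (NAME_FASTLOGGING ++ name) with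
  | none => rfl
  | some start => simp [PySem.List.slice_from_natCast]
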